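-- pv_equiv track=rewrite | github.com/gambler147/leetcode | biweeklyContest57/DescribeThePainting/Solution.py | splitPainting
-- ===== SOURCE A (Python) =====
-- from typing import List
--
-- def splitPainting(segments: List[List[int]]) -> List[List[int]]:
--     # sort by start and end points separately. O(nlogn)
--     entry = []
--     for s, e, color in segments:
--         entry.append((s, 1, color))
--         entry.append((e, -1, color))
--
--     entry.sort()
--
--     res = [ ]
--     # loop through the endpoints, if there are multiple endpoints of starting and ending points.
--     # handle endpoints first
--     i = 0
--     cur = 0 # current color
--     prev = 0 # current position in number line
--     n = len(entry)
--     while i < n: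
--         pos, flag, color = entry[i]
--         # append previous to list
--         if cur > 0 and pos > prev:
--             res.append([prev, pos, cur])
--
--         cur += flag*color # add previous color
--         while i+1 < n and entry[i+1][0] == pos and entry[i+1][1] == flag:
--             cur += flag*entry[i+1][2]
--             i += 1
--
--         prev = pos
--         i += 1
--     return res
-- ===== SOURCE B (Python) =====
-- from typing import List
--
-- def splitPainting(segments: List[List[int]]) -> List[List[int]]:
--     # For each elementary interval between adjacent distinct endpoints,
--     # recompute the total mixed color directly from all segments.
--     points = sorted({p for s, e, _ in segments for p in (s, e)})
--     res = []
--     for a, b in zip(points, points[1:]):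
--         tot = sum(c * ((s <= a) - (e <= a)) for s, e, c in segments)
--         if tot > 0:
--             res.append([a, b, tot])
--     return res
-- ===== Notes on version B (the rewrite author's own statement) =====
-- stated objective: alternative
-- what changed: Replaces A's sorted flagged-event sweep with a running accumulator and an inner run-coalescing loop by a per-elementary-interval recomputation: sort the distinct endpoints and, for each adjacent pair, sum c*((s<=a)-(e<=a)) over all segments from scratch (no events, no accumulator); trades O(n log n) for O(n^2).
import Mathlib
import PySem

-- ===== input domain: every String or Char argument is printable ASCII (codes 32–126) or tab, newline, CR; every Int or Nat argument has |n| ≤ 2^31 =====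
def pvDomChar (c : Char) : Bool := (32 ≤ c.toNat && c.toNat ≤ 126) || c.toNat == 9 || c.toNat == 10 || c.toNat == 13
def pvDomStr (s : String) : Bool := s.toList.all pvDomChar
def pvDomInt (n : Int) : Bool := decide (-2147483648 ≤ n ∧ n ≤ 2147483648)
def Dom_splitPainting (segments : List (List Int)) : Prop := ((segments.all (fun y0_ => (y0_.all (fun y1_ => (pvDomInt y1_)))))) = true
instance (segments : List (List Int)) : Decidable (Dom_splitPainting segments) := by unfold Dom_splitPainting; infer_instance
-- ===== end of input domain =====

-- ===== PORT A =====
-- B recomputes each elementary interval's color from scratch instead of sweeping events; return values proved equal on Pre_ (rows of length 3).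

-- helper for entry.sort(): Python's lexicographic order on (pos, flag, color) triples
def pvLexKey (e : Int × Int × Int) : Lex (Int × Lex (Int × Int)) :=
  toLex (e.1, toLex (e.2.1, e.2.2))

-- 'for s, e, color in segments: entry.append(...); entry.append(...)'
def pvEntry (segments : List (List Int)) : List (Int × Int × Int) :=
  segments.foldl (fun acc seg =>
    match seg with
    | [s, e, color] => acc ++ [(s, 1, color), (e, -1, color)]
    | _ => acc) []          -- a row without exactly 3 ints raises ValueError: outside Pre_

-- the inner 'while i+1 < n and entry[i+1][0] == pos and entry[i+1][1] == flag' loop: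
-- consumes the run, accumulating cur; returns (cur, remaining suffix)
def pvInner : List (Int × Int × Int) → Int → Int → Int → Int × List (Int × Int × Int)
  | [], _, _, cur => (cur, [])
  | (p, f, c) :: rest, pos, flag, cur =>
    if p = pos ∧ f = flag then pvInner rest pos flag (cur + flag * c)
    else (cur, (p, f, c) :: rest)

theorem pvInner_len (l : List (Int × Int × Int)) (pos flag cur : Int) :
    (pvInner l pos flag cur).2.length ≤ l.length := by
  induction l generalizing cur with
  | nil => simp [pvInner]
  | cons x t ih =>
    obtain ⟨p, f, c⟩ := x
    simp only [pvInner]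
    split
    · exact le_trans (ih _) (by simp)
    · simp

-- the outer 'while i < n' loop, consuming the suffix of entry from index i
def pvLoopA : List (Int × Int × Int) → Int → Int → List (List Int) → List (List Int)
  | [], _, _, res => res
  | (pos, flag, color) :: rest, cur, prev, res =>
    let res' := if cur > 0 ∧ pos > prev then res ++ [[prev, pos, cur]] else res
    let cur' := cur + flag * color
    let st := pvInner rest pos flag cur'
    pvLoopA st.2 st.1 pos res'
  termination_by l => l.length
  decreasing_by
    exact Nat.lt_succ_of_le (pvInner_len rest pos flag (cur + flag * color))

def splitPainting (segments : List (List Int)) : List (List Int) :=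
  pvLoopA (PySem.List.sorted (pvEntry segments) pvLexKey) 0 0 []

-- ===== PORT B =====
-- 'points = sorted({p for s, e, _ in segments for p in (s, e)})'
def pvPoints (segments : List (List Int)) : List Int :=
  PySem.Set.ofList (segments.flatMap (fun seg =>
    match seg with
    | [s, e, _] => [s, e]
    | _ => []))            -- a row without exactly 3 ints raises ValueError: outside Pre_

-- 'tot = sum(c * ((s <= a) - (e <= a)) for s, e, c in segments)'
def pvTot (segments : List (List Int)) (a : Int) : Int :=
  (segments.map (fun seg =>
    match seg with
    | [s, e, c] => c * ((if s ≤ a then (1 : Int) else 0) - (if e ≤ a then (1 : Int) else 0))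
    | _ => 0)).sum

def splitPainting_alt (segments : List (List Int)) : List (List Int) :=
  let points := PySem.List.sorted (pvPoints segments) (fun x => x)
  (points.zip points.tail).foldl (fun res ab =>
    let tot := pvTot segments ab.1
    if tot > 0 then res ++ [[ab.1, ab.2, tot]] else res) []

-- ===== PRECONDITION & SPEC =====
-- Pre_ excludes exactly the inputs where A raises ValueError: a row that is not 3 ints.
def Pre_splitPainting (segments : List (List Int)) : Prop :=
  ∀ seg ∈ segments, seg.length = 3
instance (segments : List (List Int)) : Decidable (Pre_splitPainting segments) := by
  unfold Pre_splitPainting; infer_instance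
def pvWitness_splitPainting : List (List Int) := [[1, 4, 5], [4, 7, 7], [1, 7, 9]]
def Spec_splitPainting (segments : List (List Int)) (out : List (List Int)) : Prop := out = splitPainting_alt segments
instance (segments : List (List Int)) (out : List (List Int)) : Decidable (Spec_splitPainting segments out) := by unfold Spec_splitPainting; infer_instance

-- ===== CLAIM (what is proved, stated in full; the proofs are below) =====
def Claim_equal_splitPainting : Prop := ∀ (segments : List (List Int)), Dom_splitPainting segments → Pre_splitPainting segments → Spec_splitPainting segments (splitPainting segments)

-- ===== LEMMAS AND PROOFS =====

-- sum of flag*color over a list of events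
def pvGsum (g : List (Int × Int × Int)) : Int := (g.map (fun e => e.2.1 * e.2.2)).sum

-- net color delta at position p in an event list
def pvFsum (l : List (Int × Int × Int)) (p : Int) : Int :=
  pvGsum (l.filter (fun e => decide (e.1 = p)))

-- sum of flag*color over events at coordinates ≤ a (the value of A's accumulator after a)
def pvG (l : List (Int × Int × Int)) (a : Int) : Int :=
  (l.map (fun e => if e.1 ≤ a then e.2.1 * e.2.2 else 0)).sum

-- the sweep shape A's loop reduces to
def pvSweep (f : Int → Int) : List Int → List (List Int) → Int → Int → List (List Int)
  | [], res, _, _ => res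
  | p :: ps, res, cur, prev =>
    pvSweep f ps (if cur > 0 ∧ p > prev then res ++ [[prev, p, cur]] else res) (cur + f p) p

theorem pvDropWhile_head_not {α : Type} (p : α → Bool) (l : List α) (x : α) (t : List α)
    (h : l.dropWhile p = x :: t) : p x = false := by
  induction l with
  | nil => simp [List.dropWhile] at h
  | cons a l ih =>
    rw [List.dropWhile] at h
    cases hp : p a with
    | true => rw [hp] at h; exact ih h
    | false =>
      rw [hp] at h
      cases h; exact hp

theorem pvInner_append (g : List (Int × Int × Int)) : ∀ (rest : List (Int × Int × Int)) (p fl cur : Int),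
    (∀ e ∈ g, e.1 = p ∧ e.2.1 = fl) →
    (∀ e t, rest = e :: t → ¬(e.1 = p ∧ e.2.1 = fl)) →
    pvInner (g ++ rest) p fl cur = (cur + pvGsum g, rest) := by
  induction g with
  | nil =>
    intro rest p fl cur _ hrest
    cases rest with
    | nil => simp [pvInner, pvGsum]
    | cons e t =>
      have := hrest e t rfl
      obtain ⟨q, f0, c⟩ := e
      simp only [List.nil_append, pvInner]
      rw [if_neg (by simpa using this)]
      simp [pvGsum]
  | cons x g' ih =>
    intro rest p fl cur hg hrest
    obtain ⟨q, f0, c⟩ := x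
    obtain ⟨hq, hf⟩ : q = p ∧ f0 = fl := by simpa using hg (q, f0, c) (by simp)
    rw [List.cons_append, pvInner]
    rw [if_pos ⟨hq, hf⟩]
    rw [ih rest p fl (cur + fl * c) (fun e he => hg e (by simp [he])) hrest]
    have : cur + fl * c + pvGsum g' = cur + pvGsum ((q, f0, c) :: g') := by
      simp only [pvGsum, List.map_cons, List.sum_cons, hf]
      ring
    rw [this]

theorem pvLoop_group_self (N : Nat) : ∀ (g : List (Int × Int × Int)), g.length ≤ N →
    ∀ (p : Int) (rest : List (Int × Int × Int)) (cur : Int) (res : List (List Int)),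
    (∀ e ∈ g, e.1 = p) → g.Pairwise (fun a b => a.2.1 ≤ b.2.1) →
    (∀ e t, rest = e :: t → e.1 ≠ p) →
    pvLoopA (g ++ rest) cur p res = pvLoopA rest (cur + pvGsum g) p res := by
  induction N with
  | zero =>
    intro g hlen p rest cur res _ _ _
    have : g = [] := List.length_eq_zero_iff.mp (Nat.le_zero.mp hlen)
    subst this
    simp [pvGsum]
  | succ N ih =>
    intro g hlen p rest cur res hg hfl hrest
    cases g with
    | nil => simp [pvGsum]
    | cons x g' =>
      obtain ⟨q, f0, c⟩ := x
      have hq : q = p := hg (q, f0, c) (by simp)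
      subst hq
      rw [List.cons_append, pvLoopA]
      rw [if_neg (by simp)]
      set run := g'.takeWhile (fun e => decide (e.2.1 = f0)) with hrun
      set g'' := g'.dropWhile (fun e => decide (e.2.1 = f0)) with hg''
      have hsplit : g' = run ++ g'' := (List.takeWhile_append_dropWhile).symm
      have happ : run ++ (g'' ++ rest) = g' ++ rest := by rw [← List.append_assoc, ← hsplit]
      have hinner : pvInner (g' ++ rest) q f0 (cur + f0 * c)
          = (cur + f0 * c + pvGsum run, g'' ++ rest) := by
        rw [← happ]
        apply pvInner_append
        · intro e he
          refine ⟨hg e (by simp [hsplit, he]), ?_⟩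
          have := List.mem_takeWhile_imp (p := fun e => decide (e.2.1 = f0)) (l := g')
            (by rw [← hrun]; exact he)
          simpa using this
        · intro e t het
          cases hgc : g'' with
          | nil =>
            rw [hgc, List.nil_append] at het
            intro hc
            exact hrest e t het hc.1
          | cons y ys =>
            rw [hgc] at het
            have hey : y = e := by injection het
            have hny := pvDropWhile_head_not _ g' y ys (by rw [← hg'']; exact hgc)
            intro hc
            rw [hey] at hny
            simp [hc.2] at hny
      rw [hinner]
      have hsub : g''.Sublist g' := by rw [hg'']; exact List.dropWhile_sublist _
      show pvLoopA (g'' ++ rest) (cur + f0 * c + pvGsum run) q res = _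
      rw [ih g'' (by
          have := hsub.length_le
          simp at hlen; omega) q rest (cur + f0 * c + pvGsum run) res
        (fun e he => hg e (by simp [hsplit, he]))
        (List.Pairwise.sublist hsub ((List.pairwise_cons.mp hfl).2))
        hrest]
      have : cur + f0 * c + pvGsum run + pvGsum g'' = cur + pvGsum ((q, f0, c) :: g') := by
        simp only [pvGsum, List.map_cons, List.sum_cons]
        rw [hsplit]
        simp only [List.map_append, List.sum_append]
        ring
      rw [this]

theorem pvLoop_group (g rest : List (Int × Int × Int)) (p cur prev : Int) (res : List (List Int))
    (hne : g ≠ [])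
    (hg : ∀ e ∈ g, e.1 = p) (hfl : g.Pairwise (fun a b => a.2.1 ≤ b.2.1))
    (hrest : ∀ e t, rest = e :: t → e.1 ≠ p) :
    pvLoopA (g ++ rest) cur prev res
      = pvLoopA rest (cur + pvGsum g) p
          (if cur > 0 ∧ p > prev then res ++ [[prev, p, cur]] else res) := by
  cases g with
  | nil => exact absurd rfl hne
  | cons x g' =>
    obtain ⟨q, f0, c⟩ := x
    have hq : q = p := hg (q, f0, c) (by simp)
    subst hq
    rw [List.cons_append, pvLoopA]
    set run := g'.takeWhile (fun e => decide (e.2.1 = f0)) with hrun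
    set g'' := g'.dropWhile (fun e => decide (e.2.1 = f0)) with hg''
    have hsplit : g' = run ++ g'' := (List.takeWhile_append_dropWhile).symm
    have happ : run ++ (g'' ++ rest) = g' ++ rest := by rw [← List.append_assoc, ← hsplit]
    have hinner : pvInner (g' ++ rest) q f0 (cur + f0 * c)
        = (cur + f0 * c + pvGsum run, g'' ++ rest) := by
      rw [← happ]
      apply pvInner_append
      · intro e he
        refine ⟨hg e (by simp [hsplit, he]), ?_⟩
        have := List.mem_takeWhile_imp (p := fun e => decide (e.2.1 = f0)) (l := g')
          (by rw [← hrun]; exact he)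
        simpa using this
      · intro e t het
        cases hgc : g'' with
        | nil =>
          rw [hgc, List.nil_append] at het
          intro hc
          exact hrest e t het hc.1
        | cons y ys =>
          rw [hgc] at het
          have hey : y = e := by injection het
          have hny := pvDropWhile_head_not _ g' y ys (by rw [← hg'']; exact hgc)
          intro hc
          rw [hey] at hny
          simp [hc.2] at hny
    rw [hinner]
    have hsub : g''.Sublist g' := by rw [hg'']; exact List.dropWhile_sublist _
    show pvLoopA (g'' ++ rest) (cur + f0 * c + pvGsum run) q
        (if cur > 0 ∧ q > prev then res ++ [[prev, q, cur]] else res) = _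
    rw [pvLoop_group_self g''.length g'' le_rfl q rest (cur + f0 * c + pvGsum run)
      (if cur > 0 ∧ q > prev then res ++ [[prev, q, cur]] else res)
      (fun e he => hg e (by simp [hsplit, he]))
      (List.Pairwise.sublist hsub ((List.pairwise_cons.mp hfl).2))
      hrest]
    have : cur + f0 * c + pvGsum run + pvGsum g'' = cur + pvGsum ((q, f0, c) :: g') := by
      simp only [pvGsum, List.map_cons, List.sum_cons]
      rw [hsplit]
      simp only [List.map_append, List.sum_append]
      ring
    rw [this]

-- the lexicographic pairwise order we extract from entry.sort()
def pvLexLe (a b : Int × Int × Int) : Prop := a.1 < b.1 ∨ (a.1 = b.1 ∧ a.2.1 ≤ b.2.1)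

theorem pvLoopA_sweep (N : Nat) : ∀ (l : List (Int × Int × Int)) (ps : List Int)
    (f : Int → Int) (cur prev : Int) (res : List (List Int)),
    l.length ≤ N →
    l.Pairwise pvLexLe →
    ps.Pairwise (· < ·) →
    (∀ p, p ∈ ps ↔ p ∈ l.map (·.1)) →
    (∀ p ∈ ps, f p = pvFsum l p) →
    pvLoopA l cur prev res = pvSweep f ps res cur prev := by
  induction N with
  | zero =>
    intro l ps f cur prev res hlen _ _ hmem _
    have hl : l = [] := List.length_eq_zero_iff.mp (Nat.le_zero.mp hlen)
    subst hl
    have hps : ps = [] := by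
      cases ps with
      | nil => rfl
      | cons q qs => exact absurd ((hmem q).mp (by simp)) (by simp)
    subst hps
    simp [pvLoopA, pvSweep]
  | succ N ih =>
    intro l ps f cur prev res hlen hlex hps hmem hf
    cases l with
    | nil =>
      have hps' : ps = [] := by
        cases ps with
        | nil => rfl
        | cons q qs => exact absurd ((hmem q).mp (by simp)) (by simp)
      subst hps'
      simp [pvLoopA, pvSweep]
    | cons x t =>
    obtain ⟨p, f0, c⟩ := x
    set g := ((p, f0, c) :: t).takeWhile (fun e => decide (e.1 = p)) with hgdef
    set rest := ((p, f0, c) :: t).dropWhile (fun e => decide (e.1 = p)) with hrestdef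
    have hsplit : (p, f0, c) :: t = g ++ rest := (List.takeWhile_append_dropWhile).symm
    have hgpos : ∀ e ∈ g, e.1 = p := by
      intro e he
      have := List.mem_takeWhile_imp (by rw [← hgdef]; exact he)
      simpa using this
    have hrestsub : rest.Sublist ((p, f0, c) :: t) := by
      rw [hrestdef]; exact List.dropWhile_sublist _
    -- every event of rest sits strictly right of p
    have hrestgt : ∀ e ∈ rest, p < e.1 := by
      intro e he
      cases hrc : rest with
      | nil => rw [hrc] at he; simp at he
      | cons e0 t0 =>
        have he0ne : e0.1 ≠ p := by
          have := pvDropWhile_head_not _ _ e0 t0 (by rw [← hrestdef]; exact hrc)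
          simpa using this
        have he0mem : e0 ∈ (p, f0, c) :: t := hrestsub.mem (by rw [hrc]; simp)
        have he0gt : p < e0.1 := by
          rcases List.mem_cons.mp he0mem with h | h
          · exact absurd (by rw [h]) he0ne
          · have := (List.pairwise_cons.mp hlex).1 e0 h
            rcases this with h2 | ⟨h2, _⟩
            · exact h2
            · exact absurd h2.symm he0ne
        rw [hrc] at he
        rcases List.mem_cons.mp he with h | h
        · rwa [h]
        · have hpw : rest.Pairwise pvLexLe := List.Pairwise.sublist hrestsub hlex
          rw [hrc] at hpw
          have := (List.pairwise_cons.mp hpw).1 e h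
          rcases this with hlt | ⟨heq, _⟩
          · exact lt_trans he0gt hlt
          · rw [← heq]; exact he0gt
    have hgne : g ≠ [] := by
      rw [hgdef]
      simp [List.takeWhile]
    -- ps = p :: ps'
    have hpmem : p ∈ ps := (hmem p).mpr (by simp)
    obtain ⟨q, ps', hpsc⟩ : ∃ q ps', ps = q :: ps' := by
      cases ps with
      | nil => simp at hpmem
      | cons q ps' => exact ⟨q, ps', rfl⟩
    have hqp : q = p := by
      have hqmem : q ∈ ((p, f0, c) :: t).map (·.1) := (hmem q).mp (by rw [hpsc]; simp)
      have hqge : p ≤ q := by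
        simp only [List.map_cons, List.mem_cons] at hqmem
        rcases hqmem with h | h
        · omega
        · obtain ⟨e, he, heq⟩ := List.mem_map.mp h
          have := (List.pairwise_cons.mp hlex).1 e he
          rcases this with hlt | ⟨heq2, _⟩
          · omega
          · omega
      rw [hpsc] at hpmem
      rcases List.mem_cons.mp hpmem with h | h
      · omega
      · have := (List.pairwise_cons.mp (hpsc ▸ hps)).1 p h
        omega
    subst hqp
    -- flags within g are pairwise ≤
    have hgfl : g.Pairwise (fun a b => a.2.1 ≤ b.2.1) := by
      have hgsub : g.Sublist ((q, f0, c) :: t) := by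
        rw [hgdef]; exact List.takeWhile_sublist _
      have hpw := List.Pairwise.sublist hgsub hlex
      refine hpw.imp_of_mem ?_
      intro a b ha hb hab
      rcases hab with h | ⟨_, h⟩
      · have := hgpos a ha; have := hgpos b hb; omega
      · exact h
    -- group step on the A side
    rw [hsplit, pvLoop_group g rest q cur prev res hgne hgpos hgfl
      (fun e t' het => by
        have : e ∈ rest := by rw [het]; simp
        have := hrestgt e this; omega)]
    -- sweep step on the ps side
    rw [hpsc, pvSweep]
    -- f q = pvGsum g
    have hfilter : ((q, f0, c) :: t).filter (fun e => decide (e.1 = q)) = g := by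
      rw [hsplit, List.filter_append]
      have h1 : g.filter (fun e => decide (e.1 = q)) = g :=
        List.filter_eq_self.mpr (fun e he => by simpa using hgpos e he)
      have h2 : rest.filter (fun e => decide (e.1 = q)) = [] :=
        List.filter_eq_nil_iff.mpr (fun e he => by
          have := hrestgt e he; simpa using (by omega : ¬ e.1 = q))
      rw [h1, h2, List.append_nil]
    have hfp : f q = pvGsum g := by
      rw [hf q (by rw [hpsc]; simp), pvFsum, hfilter]
    rw [hfp]
    -- recurse via ih
    apply ih rest ps' f
    · have hgl : 0 < g.length := by
        cases hgc : g with
        | nil => exact absurd hgc hgne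
        | cons _ _ => simp
      have : g.length + rest.length = t.length + 1 := by
        have := congrArg List.length hsplit
        simp only [List.length_cons, List.length_append] at this
        omega
      simp only [List.length_cons] at hlen
      omega
    · exact List.Pairwise.sublist hrestsub hlex
    · exact (List.pairwise_cons.mp (hpsc ▸ hps)).2
    · intro r
      constructor
      · intro hr
        have hrgt : q < r := (List.pairwise_cons.mp (hpsc ▸ hps)).1 r hr
        have : r ∈ ((q, f0, c) :: t).map (·.1) := (hmem r).mp (by rw [hpsc]; simp [hr])
        rw [hsplit, List.map_append, List.mem_append] at this
        rcases this with h | h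
        · obtain ⟨e, he, heq⟩ := List.mem_map.mp h
          have := hgpos e he; omega
        · exact h
      · intro hr
        obtain ⟨e, he, heq⟩ := List.mem_map.mp hr
        have hrgt : q < r := heq ▸ hrestgt e he
        have : r ∈ ps := (hmem r).mpr (by
          rw [hsplit, List.map_append, List.mem_append]; exact Or.inr hr)
        rw [hpsc] at this
        rcases List.mem_cons.mp this with h | h
        · omega
        · exact h
    · intro r hr
      have hrgt : q < r := (List.pairwise_cons.mp (hpsc ▸ hps)).1 r hr
      rw [hf r (by rw [hpsc]; simp [hr])]
      unfold pvFsum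
      rw [hsplit, List.filter_append]
      have h1 : g.filter (fun e => decide (e.1 = r)) = [] :=
        List.filter_eq_nil_iff.mpr (fun e he => by
          have := hgpos e he; simpa using (by omega : ¬ e.1 = r))
      rw [h1, List.nil_append]

-- the event list as one flatMap, for reasoning about pvEntry and the B-side sums together
def pvEnt (segs : List (List Int)) : List (Int × Int × Int) :=
  segs.flatMap (fun seg => match seg with | [s, e, c] => [(s, 1, c), (e, -1, c)] | _ => [])

theorem pvEntry_eq (segs : List (List Int)) : ∀ acc,
    segs.foldl (fun acc seg =>
      match seg with
      | [s, e, color] => acc ++ [(s, 1, color), (e, -1, color)]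
      | _ => acc) acc = acc ++ pvEnt segs := by
  induction segs with
  | nil => intro acc; simp [pvEnt]
  | cons seg segs ih =>
    intro acc
    rw [List.foldl_cons, ih]
    rcases seg with _ | ⟨s, _ | ⟨e, _ | ⟨c, _ | _⟩⟩⟩ <;> simp [pvEnt]

-- B's per-interval total is the event sum over coordinates ≤ a
theorem pvTot_eq_pvG (segs : List (List Int)) (a : Int) :
    pvTot segs a = pvG (pvEnt segs) a := by
  induction segs with
  | nil => simp [pvTot, pvG, pvEnt]
  | cons seg segs ih =>
    rcases seg with _ | ⟨s, _ | ⟨e, _ | ⟨c, _ | _⟩⟩⟩ <;>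
      · simp only [pvTot, pvG, pvEnt] at *
        simp only [List.flatMap_cons, List.map_cons, List.map_append, List.sum_cons,
          List.sum_append, List.nil_append]
        rw [ih]
        first
          | (split_ifs <;> (simp only [List.map_nil, List.sum_nil]; ring))
          | ring

-- coordinates occurring in the event list = endpoints collected by B's set comprehension
theorem pvEnt_coords (segs : List (List Int)) (p : Int) :
    (p ∈ (pvEnt segs).map (·.1)) ↔
      p ∈ segs.flatMap (fun seg => match seg with | [s, e, _] => [s, e] | _ => []) := by
  induction segs with
  | nil => simp [pvEnt]
  | cons seg segs ih =>
    rcases seg with _ | ⟨s, _ | ⟨e, _ | ⟨c, _ | _⟩⟩⟩ <;>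
      simp only [pvEnt, List.flatMap_cons, List.map_append, List.mem_append] at ih ⊢ <;>
      simp at ih ⊢ <;> rw [ih]

-- stepping the accumulated sum from one coordinate to the next one present
theorem pvG_step (l : List (Int × Int × Int)) (a b : Int) (hab : a < b)
    (hl : ∀ e ∈ l, e.1 ≤ a ∨ b ≤ e.1) :
    pvG l b = pvG l a + pvFsum l b := by
  induction l with
  | nil => simp [pvG, pvFsum, pvGsum]
  | cons x t ih =>
    have hx := hl x (by simp)
    have ht : ∀ e ∈ t, e.1 ≤ a ∨ b ≤ e.1 := fun e he => hl e (by simp [he])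
    have ihh := ih ht
    simp only [pvG, pvFsum, pvGsum, List.map_cons, List.sum_cons, List.filter_cons] at ihh ⊢
    rcases hx with h | h
    · rw [if_pos (show x.1 ≤ b by omega), if_pos h,
        if_neg (show ¬ (decide (x.1 = b) = true) by simp; omega)]
      rw [ihh]; ring
    · by_cases hxb : x.1 = b
      · rw [if_pos (show x.1 ≤ b by omega), if_neg (show ¬ x.1 ≤ a by omega),
          if_pos (show decide (x.1 = b) = true by simp [hxb])]
        simp only [List.map_cons, List.sum_cons]
        rw [ihh]; ring
      · rw [if_neg (show ¬ x.1 ≤ b by omega), if_neg (show ¬ x.1 ≤ a by omega),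
          if_neg (show ¬ (decide (x.1 = b) = true) by simp [hxb])]
        rw [ihh]; ring

-- at the least coordinate, the accumulated sum is just the delta there
theorem pvG_min (l : List (Int × Int × Int)) (a : Int) (hl : ∀ e ∈ l, a ≤ e.1) :
    pvG l a = pvFsum l a := by
  induction l with
  | nil => simp [pvG, pvFsum, pvGsum]
  | cons x t ih =>
    have hx := hl x (by simp)
    have ht : ∀ e ∈ t, a ≤ e.1 := fun e he => hl e (by simp [he])
    have ihh := ih ht
    simp only [pvG, pvFsum, pvGsum, List.map_cons, List.sum_cons, List.filter_cons] at ihh ⊢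
    by_cases hxa : x.1 = a
    · rw [if_pos (show x.1 ≤ a by omega), if_pos (show decide (x.1 = a) = true by simp [hxa])]
      simp only [List.map_cons, List.sum_cons]
      rw [ihh]
    · rw [if_neg (show ¬ x.1 ≤ a by omega),
        if_neg (show ¬ (decide (x.1 = a) = true) by simp [hxa]), ihh]
      ring

-- the sweep, once primed at the first coordinate, equals B's fold over adjacent pairs
theorem pvSweep_zip (f g : Int → Int) : ∀ (ps : List Int) (a : Int) (res : List (List Int)),
    (a :: ps).Pairwise (· < ·) →
    List.Chain (fun x y => g y = g x + f y) a ps →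
    pvSweep f ps res (g a) a =
      ((a :: ps).zip ps).foldl
        (fun r ab => if g ab.1 > 0 then r ++ [[ab.1, ab.2, g ab.1]] else r) res := by
  intro ps
  induction ps with
  | nil => intro a res _ _; simp [pvSweep]
  | cons b ps' ih =>
    intro a res hsort hchain
    have hab : a < b := (List.pairwise_cons.mp hsort).1 b (by simp)
    have hgb : g b = g a + f b := (List.chain_cons.mp hchain).1
    have hif : (if g a > 0 ∧ b > a then res ++ [[a, b, g a]] else res)
        = (if g a > 0 then res ++ [[a, b, g a]] else res) := by
      by_cases hg : g a > 0
      · rw [if_pos ⟨hg, hab⟩, if_pos hg]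
      · rw [if_neg (by tauto), if_neg hg]
    show pvSweep f ps' (if g a > 0 ∧ b > a then res ++ [[a, b, g a]] else res) (g a + f b) b = _
    rw [hif, ← hgb]
    exact ih b (if g a > 0 then res ++ [[a, b, g a]] else res)
      (List.pairwise_cons.mp hsort).2 (List.chain_cons.mp hchain).2

-- the chain hypothesis holds when every event coordinate is accounted for
theorem pvChain (l : List (Int × Int × Int)) : ∀ (ps : List Int) (a : Int),
    (a :: ps).Pairwise (· < ·) →
    (∀ e ∈ l, e.1 ≤ a ∨ e.1 ∈ ps) →
    List.Chain (fun x y => pvG l y = pvG l x + pvFsum l y) a ps := by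
  intro ps
  induction ps with
  | nil => intro a _ _; exact List.Chain.nil
  | cons b ps' ih =>
    intro a hsort hl
    have hab : a < b := (List.pairwise_cons.mp hsort).1 b (by simp)
    refine List.Chain.cons ?_ (ih b (List.pairwise_cons.mp hsort).2 ?_)
    · apply pvG_step l a b hab
      intro e he
      rcases hl e he with h | h
      · exact Or.inl h
      · rcases List.mem_cons.mp h with h2 | h2
        · omega
        · have := (List.pairwise_cons.mp (List.pairwise_cons.mp hsort).2).1 e.1 h2
          omega
    · intro e he
      rcases hl e he with h | h
      · omega
      · rcases List.mem_cons.mp h with h2 | h2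
        · omega
        · exact Or.inr h2

theorem pvFsum_perm (l l' : List (Int × Int × Int)) (h : l.Perm l') (p : Int) :
    pvFsum l p = pvFsum l' p := by
  unfold pvFsum pvGsum
  exact ((h.filter _).map _).sum_eq

theorem pvSorted_lexle (l : List (Int × Int × Int)) :
    (PySem.List.sorted l pvLexKey).Pairwise pvLexLe := by
  have h := PySem.List.sorted_pairwise l pvLexKey
  refine h.imp ?_
  intro a b hab
  unfold pvLexKey at hab
  rw [Prod.Lex.le_iff] at hab
  simp only [ofLex_toLex] at hab
  rcases hab with h | ⟨h1, h2⟩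
  · exact Or.inl h
  · rw [Prod.Lex.le_iff] at h2
    simp only [ofLex_toLex] at h2
    rcases h2 with h2 | ⟨h2, _⟩
    · exact Or.inr ⟨h1, le_of_lt h2⟩
    · exact Or.inr ⟨h1, le_of_eq h2⟩

-- ===== VERDICT (by name: the statement is the Claim_ definition above) =====
theorem splitPainting_spec : Claim_equal_splitPainting := by
  intro segments hdom hpre
  unfold Spec_splitPainting splitPainting splitPainting_alt
  have hent : pvEntry segments = pvEnt segments := by
    unfold pvEntry
    rw [pvEntry_eq]
    simp
  set l := PySem.List.sorted (pvEntry segments) pvLexKey with hl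
  have hperm : l.Perm (pvEnt segments) := by
    rw [hl, hent]
    exact PySem.List.sorted_perm _ _ _
  set points := PySem.List.sorted (pvPoints segments) (fun x => x) with hpts
  have hpsort : points.Pairwise (· < ·) := by
    rw [hpts]
    unfold pvPoints
    exact PySem.List.sorted_ofList_pairwise_lt _
  have hpmem : ∀ p, p ∈ points ↔ p ∈ l.map (·.1) := by
    intro p
    rw [hpts, PySem.List.mem_sorted]
    unfold pvPoints
    rw [PySem.Set.mem_ofList, ← pvEnt_coords]
    exact ⟨fun h => ((hperm.map (·.1)).mem_iff).mpr h,
           fun h => ((hperm.map (·.1)).mem_iff).mp h⟩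
  -- step 1: A's loop is the sweep over the sorted distinct coordinates
  rw [pvLoopA_sweep l.length l points (fun p => pvFsum l p) 0 0 [] le_rfl
    (hl ▸ pvSorted_lexle _) hpsort hpmem (fun p _ => rfl)]
  -- step 2: the sweep equals B's fold over adjacent coordinate pairs
  cases hpc : points with
  | nil => simp [pvSweep]
  | cons p0 ps' =>
    have hmin : ∀ e ∈ pvEnt segments, p0 ≤ e.1 := by
      intro e he
      have : e.1 ∈ points := (hpmem e.1).mpr (by
        rw [(hperm.map (·.1)).mem_iff]
        exact List.mem_map.mpr ⟨e, he, rfl⟩)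
      rw [hpc] at this
      rcases List.mem_cons.mp this with h | h
      · omega
      · have := (List.pairwise_cons.mp (hpc ▸ hpsort)).1 e.1 h
        omega
    have hTot : ∀ a, pvTot segments a = pvG (pvEnt segments) a := fun a => pvTot_eq_pvG _ _
    have hF : ∀ p, pvFsum l p = pvFsum (pvEnt segments) p := fun p => pvFsum_perm _ _ hperm p
    -- first sweep step: cur = 0 emits nothing, accumulator becomes f p0 = g p0
    show pvSweep (fun p => pvFsum l p) ps'
        (if (0:Int) > 0 ∧ p0 > 0 then [] ++ [[0, p0, 0]] else []) (0 + pvFsum l p0) p0 = _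
    rw [if_neg (by simp)]
    have hcur : 0 + pvFsum l p0 = pvG (pvEnt segments) p0 := by
      rw [zero_add, hF, pvG_min (pvEnt segments) p0 hmin]
    rw [hcur]
    have hchain : List.Chain (fun x y =>
        pvG (pvEnt segments) y = pvG (pvEnt segments) x + pvFsum l y) p0 ps' := by
      have := pvChain (pvEnt segments) ps' p0 (hpc ▸ hpsort) (by
        intro e he
        have : e.1 ∈ points := (hpmem e.1).mpr (by
          rw [(hperm.map (·.1)).mem_iff]
          exact List.mem_map.mpr ⟨e, he, rfl⟩)
        rw [hpc] at this
        rcases List.mem_cons.mp this with h | h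
        · exact Or.inl (le_of_eq h)
        · exact Or.inr h)
      exact List.Chain.imp (fun x y h => by rw [hF y]; exact h) this
    rw [pvSweep_zip (fun p => pvFsum l p) (fun a => pvG (pvEnt segments) a) ps' p0 []
      (hpc ▸ hpsort) hchain]
    -- identify B's fold body
    show _ = List.foldl (fun (res : List (List Int)) (ab : Int × Int) =>
        let tot := pvTot segments ab.1
        if tot > 0 then res ++ [[ab.1, ab.2, tot]] else res) [] ((p0 :: ps').zip ps')
    have hfun : (fun (res : List (List Int)) (ab : Int × Int) =>
          let tot := pvTot segments ab.1
          if tot > 0 then res ++ [[ab.1, ab.2, tot]] else res)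
        = (fun r ab => if pvG (pvEnt segments) ab.1 > 0
            then r ++ [[ab.1, ab.2, pvG (pvEnt segments) ab.1]] else r) := by
      funext r ab
      show (if pvTot segments ab.1 > 0 then r ++ [[ab.1, ab.2, pvTot segments ab.1]] else r) = _
      rw [hTot ab.1]
    rw [hfun]
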